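-- pv_equiv track=rewrite | github.com/Brian-Mascitello/Advent-of-Code | Advent of Code 2017/Day 6 2017/Day6Q2 2017.py | memory_reallocate
-- ===== SOURCE A (Python) =====
-- def memory_reallocate(memory):
--     memory_to_redistribute = max(memory)
--     index = memory.index(memory_to_redistribute)
--     memory[index] = 0
--     while memory_to_redistribute > 0:
--         index += 1
--         if index == len(memory):
--             index = 0
--         memory[index] += 1
--         memory_to_redistribute -= 1
--     return memory
-- ===== SOURCE B (Python) =====
-- def memory_reallocate(memory):
--     n = len(memory)
--     m = max(memory)
--     i = memory.index(m)
--     memory[i] = 0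
--     if m > 0:
--         q, r = divmod(m, n)
--         for j in range(n):
--             memory[j] += q + (1 if (j - i - 1) % n < r else 0)
--     return memory
-- ===== Notes on version B (the rewrite author's own statement) =====
-- stated objective: faster
-- what changed: B replaces A's one-token-at-a-time redistribution while-loop (max(memory) iterations) with a single divmod: every slot gains the quotient and the first remainder slots after the maximum gain one extra, in one O(n) pass.
-- outside the precondition, e.g. on memory_reallocate([]): A raises ValueError, B raises ValueError
import Mathlib
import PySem

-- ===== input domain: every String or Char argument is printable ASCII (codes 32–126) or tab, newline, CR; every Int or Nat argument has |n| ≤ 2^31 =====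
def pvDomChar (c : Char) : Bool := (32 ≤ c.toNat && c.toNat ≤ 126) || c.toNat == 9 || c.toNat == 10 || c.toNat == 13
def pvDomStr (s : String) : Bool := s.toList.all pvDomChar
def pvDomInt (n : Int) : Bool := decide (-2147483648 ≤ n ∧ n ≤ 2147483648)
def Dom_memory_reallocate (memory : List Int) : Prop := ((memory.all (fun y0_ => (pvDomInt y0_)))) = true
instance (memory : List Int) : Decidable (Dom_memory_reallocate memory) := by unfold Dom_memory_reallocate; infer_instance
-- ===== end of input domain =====

-- B replaces A's one-token-at-a-time while-loop with a single divmod pass (O(n) instead of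
-- O(max+n)); equivalence is about the RETURN value (both Pythons also mutate `memory` in place,
-- and both return the same mutated list object).

-- ===== PORT A =====
-- A's while-loop: one token moved per iteration; `index` always stays in [0, mem.length),
-- so `memory[index] += 1` is ported exactly by `modify index.toNat`.
def pvLoopA (m : Int) (index : Int) (mem : List Int) : List Int :=
  if _h : 0 < m then
    let i1 := index + 1
    let i2 := if i1 = (mem.length : Int) then 0 else i1
    pvLoopA (m - 1) i2 (mem.modify i2.toNat (· + 1))
  else mem
termination_by m.toNat
decreasing_by omega

def memory_reallocate (memory : List Int) : List Int :=
  match PySem.List.max? memory (fun y => y) with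
  | none => []          -- max([]) raises ValueError: excluded by Pre_
  | some m =>
    match PySem.List.index? memory m with
    | none => []        -- unreachable: the max is a member
    | some idx => pvLoopA m (idx : Int) (memory.set idx 0)

-- ===== PORT B =====
def memory_reallocate_alt (memory : List Int) : List Int :=
  let n := memory.length
  match PySem.List.max? memory (fun y => y) with
  | none => []          -- max([]) raises ValueError: excluded by Pre_
  | some m =>
    match PySem.List.index? memory m with
    | none => []        -- unreachable: the max is a member
    | some i =>
      let mem := memory.set i 0
      if 0 < m then
        let q := PySem.Int.floordiv m (n : Int)
        let r := PySem.Int.mod m (n : Int)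
        (List.range n).foldl
          (fun a j => a.modify j
            (fun v => v + q + (if PySem.Int.mod ((j : Int) - (i : Int) - 1) (n : Int) < r then 1 else 0)))
          mem
      else mem

-- ===== PRECONDITION & SPEC =====
-- Pre_ excludes only the empty list, on which Python's max([]) raises ValueError (in both A and B).
def Pre_memory_reallocate (memory : List Int) : Prop := memory ≠ []
instance (memory : List Int) : Decidable (Pre_memory_reallocate memory) := by
  unfold Pre_memory_reallocate; infer_instance
def pvWitness_memory_reallocate : List Int := [0, 2, 7, 0]

def Spec_memory_reallocate (memory : List Int) (out : List Int) : Prop := out = memory_reallocate_alt memory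
instance (memory : List Int) (out : List Int) : Decidable (Spec_memory_reallocate memory out) := by unfold Spec_memory_reallocate; infer_instance

-- ===== CLAIM (what is proved, stated in full; the proofs are below) =====
def Claim_equal_memory_reallocate : Prop := ∀ (memory : List Int), Dom_memory_reallocate memory → Pre_memory_reallocate memory → Spec_memory_reallocate memory (memory_reallocate memory)

-- ===== LEMMAS AND PROOFS =====

-- number of steps after slot `idx` (cyclically) until slot `j` is reached, minus one:
-- slot idx+1 is at distance 0, …, slot idx is at distance n-1.
def pvDist (n idx j : Nat) : Nat := if idx < j then j - idx - 1 else n + j - idx - 1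

lemma pvLoopA_length (m index : Int) (mem : List Int) :
    (pvLoopA m index mem).length = mem.length := by
  fun_induction pvLoopA with
  | case1 m index mem h i1 i2 ih => simpa using ih
  | case2 => rfl

lemma pvDist_lt {n idx j : Nat} (hi : idx < n) (hj : j < n) : pvDist n idx j < n := by
  unfold pvDist; split <;> omega

-- elementwise characterisation of A's loop
lemma pvLoopA_get (k : Nat) :
    ∀ (m : Int) (idx : Nat) (mem : List Int), m.toNat = k → 0 ≤ m → idx < mem.length →
    ∀ j, j < mem.length →
      (pvLoopA m (idx : Int) mem)[j]? =
        some (mem[j]! + (m - (pvDist mem.length idx j : Int) + (mem.length : Int) - 1) / (mem.length : Int)) := by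
  induction k with
  | zero =>
    intro m idx mem hk hm hi j hj
    have hm0 : m = 0 := by omega
    subst hm0
    rw [pvLoopA]
    simp only [lt_irrefl, dite_false]
    have hn : 0 < (mem.length : Int) := by exact_mod_cast Nat.zero_lt_of_lt hj
    have hd0 : (0 : Int) ≤ (pvDist mem.length idx j : Int) := by positivity
    have hdlt : (pvDist mem.length idx j : Int) < (mem.length : Int) := by
      exact_mod_cast pvDist_lt hi hj
    rw [Int.ediv_eq_zero_of_lt (by omega) (by omega)]
    simp [List.getElem!_eq_getElem?_getD, List.getElem?_eq_getElem hj]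
  | succ k ih =>
    intro m idx mem hk hm hi j hj
    have hmpos : 0 < m := by omega
    rw [pvLoopA]
    simp only [dif_pos hmpos]
    have hcast : (if (idx : Int) + 1 = (mem.length : Int) then (0 : Int) else (idx : Int) + 1)
        = ((if idx + 1 = mem.length then 0 else idx + 1 : Nat) : Int) := by
      split_ifs with h1 h2 h2 <;> push_cast <;> omega
    rw [hcast]
    set i2N : Nat := if idx + 1 = mem.length then 0 else idx + 1 with hi2N
    have hi2lt : i2N < mem.length := by rw [hi2N]; split <;> omega
    rw [Int.toNat_natCast]
    rw [ih (m - 1) i2N (mem.modify i2N fun x => x + 1) (by omega) (by omega)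
        (by simpa using hi2lt) j (by simpa using hj)]
    have hgm : (mem.modify i2N fun x => x + 1)[j]!
        = if i2N = j then mem[j]! + 1 else mem[j]! := by
      have h1 := List.getElem_modify (fun x => x + 1) i2N mem j (by simpa using hj)
      simp only [List.getElem!_eq_getElem?_getD,
        List.getElem?_eq_getElem (by simpa using hj : j < (mem.modify i2N fun x => x + 1).length),
        List.getElem?_eq_getElem hj, Option.getD_some] at *
      exact h1
    rw [hgm]
    simp only [List.length_modify]
    have hn : 0 < (mem.length : Int) := by exact_mod_cast Nat.zero_lt_of_lt hj
    by_cases hz : pvDist mem.length idx j = 0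
    · -- j is the next slot: it receives this step's token
      have hij : i2N = j := by
        unfold pvDist at hz; rw [hi2N]; split at hz <;> split <;> omega
      have hd' : pvDist mem.length i2N j = mem.length - 1 := by
        unfold pvDist; rw [hi2N]; unfold pvDist at hz; split at hz <;> split_ifs <;> omega
      rw [if_pos hij, hd', hz]
      have hnum : m - 1 - ((mem.length - 1 : Nat) : Int) + (mem.length : Int) - 1
          = m - 1 - ((mem.length : Int) - 1) + (mem.length : Int) - 1 := by
        have : ((mem.length - 1 : Nat) : Int) = (mem.length : Int) - 1 := by omega
        rw [this]
      rw [hnum]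
      have hbig : m - (0 : Nat) + (mem.length : Int) - 1 = (m - 1) + 1 * (mem.length : Int) := by
        push_cast; ring
      rw [hbig, Int.add_mul_ediv_right _ _ hn.ne']
      have : m - 1 - ((mem.length : Int) - 1) + (mem.length : Int) - 1 = m - 1 := by ring
      rw [this]
      congr 1
      ring
    · -- j is not the next slot: distance shrinks by one
      have hij : i2N ≠ j := by
        unfold pvDist at hz; rw [hi2N]; split at hz <;> split <;> omega
      have hd' : pvDist mem.length i2N j = pvDist mem.length idx j - 1 := by
        unfold pvDist; rw [hi2N]; unfold pvDist at hz; split at hz <;> split_ifs <;> omega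
      rw [if_neg hij, hd']
      have hnum : m - 1 - ((pvDist mem.length idx j - 1 : Nat) : Int) + (mem.length : Int) - 1
          = m - (pvDist mem.length idx j : Nat) + (mem.length : Int) - 1 := by omega
      rw [hnum]

-- B's update loop acts elementwise
lemma foldl_modify_length (g : Nat → Int → Int) (l : List Nat) (mem : List Int) :
    (l.foldl (fun a j => a.modify j (g j)) mem).length = mem.length := by
  induction l generalizing mem with
  | nil => rfl
  | cons x t ihl => simp [List.foldl_cons, ihl]

lemma foldl_modify_get (g : Nat → Int → Int) (n : Nat) (mem : List Int) (j : Nat)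
    (hj : j < mem.length) :
    ((List.range n).foldl (fun a j => a.modify j (g j)) mem)[j]? =
      some (if j < n then g j mem[j]! else mem[j]!) := by
  induction n with
  | zero => simp [List.getElem?_eq_getElem hj, List.getElem!_eq_getElem?_getD]
  | succ n ihn =>
    rw [List.range_succ, List.foldl_append, List.foldl_cons, List.foldl_nil,
      List.getElem?_modify, ihn]
    by_cases hnj : n = j
    · subst hnj
      simp [List.getElem!_eq_getElem?_getD, List.getElem?_eq_getElem hj]
    · simp only [Option.map_eq_map, Option.map_some, if_neg hnj]
      by_cases hlt : j < n
      · rw [if_pos hlt, if_pos (by omega)]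
      · rw [if_neg hlt, if_neg (by omega)]

-- Python '% n' of the signed gap is exactly the cyclic distance
lemma pymod_eq_pvDist (n i j : Nat) (hi : i < n) (hj : j < n) :
    PySem.Int.mod ((j : Int) - (i : Int) - 1) (n : Int) = (pvDist n i j : Int) := by
  have hn : 0 < (n : Int) := by exact_mod_cast Nat.zero_lt_of_lt hj
  rw [PySem.Int.mod_eq_emod_of_pos hn]
  unfold pvDist
  by_cases h : i < j
  · rw [if_pos h, Int.emod_eq_of_lt (by omega) (by omega)]
    omega
  · rw [if_neg h]
    have hx : (j : Int) - (i : Int) - 1 = ((n + j - i - 1 : Nat) : Int) + (n : Int) * (-1) := by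
      omega
    rw [hx, Int.add_mul_emod_self_left, Int.emod_eq_of_lt (by omega) (by omega)]

-- the count each slot receives from m round-robin tokens, via divmod
lemma count_formula (m n d : Int) (hn : 0 < n) (hd0 : 0 ≤ d) (hdn : d < n) :
    (m - d + n - 1) / n = m / n + (if d < m % n then 1 else 0) := by
  have he0 : 0 ≤ m % n := Int.emod_nonneg m hn.ne'
  have hen : m % n < n := Int.emod_lt_of_pos m hn
  have hsplit : m - d + n - 1 = (m % n - d + n - 1) + (m / n) * n := by
    linear_combination -Int.emod_add_mul_ediv m n
  rw [hsplit, Int.add_mul_ediv_right _ _ hn.ne']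
  by_cases h : d < m % n
  · rw [if_pos h]
    have : m % n - d + n - 1 = (m % n - d - 1) + 1 * n := by ring
    rw [this, Int.add_mul_ediv_right _ _ hn.ne',
      Int.ediv_eq_zero_of_lt (by omega) (by omega)]
    ring
  · rw [if_neg h, Int.ediv_eq_zero_of_lt (by omega) (by omega)]
    ring

theorem memory_reallocate_spec : Claim_equal_memory_reallocate := by
  intro memory _hdom hpre
  unfold Spec_memory_reallocate memory_reallocate memory_reallocate_alt
  cases hmax : PySem.List.max? memory (fun y => y) with
  | none => exact absurd ((PySem.List.max?_eq_none_iff memory _).mp hmax) hpre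
  | some m =>
    have hmem : m ∈ memory := PySem.List.max?_mem hmax
    cases hidx : PySem.List.index? memory m with
    | none =>
      have := (PySem.List.index?_isSome_iff memory m).mpr hmem
      rw [hidx] at this; simp at this
    | some i =>
      obtain ⟨hi, -, -⟩ := PySem.List.getElem_of_index?_eq_some hidx
      simp only [hidx]
      set mem' : List Int := memory.set i 0 with hmem'
      have hlen' : mem'.length = memory.length := by rw [hmem']; simp
      have hi' : i < mem'.length := by omega
      have hn : 0 < (memory.length : Int) := by exact_mod_cast Nat.zero_lt_of_lt hi
      by_cases hm : 0 < m
      · rw [if_pos hm]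
        apply List.ext_getElem?
        intro j
        by_cases hj : j < memory.length
        · rw [pvLoopA_get m.toNat m i mem' rfl (by omega) hi' j (by omega),
            foldl_modify_get _ _ _ _ (by omega), if_pos hj]
          congr 1
          rw [pymod_eq_pvDist memory.length i j hi hj,
            PySem.Int.floordiv_eq_ediv_of_pos hn, PySem.Int.mod_eq_emod_of_pos hn,
            hlen', count_formula m _ _ hn (by positivity)
              (by exact_mod_cast pvDist_lt hi hj)]
          ring
        · rw [List.getElem?_eq_none (by rw [pvLoopA_length]; omega),
            List.getElem?_eq_none (by rw [foldl_modify_length]; omega)]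
      · rw [if_neg hm, pvLoopA, dif_neg hm]
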